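-- pv_equiv track=rewrite | github.com/gorla/appmining | permission/permission_luigi.py | process_obfuscated_pkg
-- ===== SOURCE A (Python) =====
-- def process_obfuscated_pkg(loc):
--     if loc == 'appcode' or loc == 'appcode/':
--         return 'appcode'
--
--     if loc == '.':
--         return '_OBFUSCATED_'
--
--     split = loc.split('.')
--
--     cut = len(split)
--     for s in reversed(split):
--         if len(s) > 1:
--             break
--         else:
--             cut -= 1
--
--     # if pkg path was cut and only has length of one
--     if cut > 1 or cut == len(split):
--         return '.'.join(split[0:cut])
--     else:
--         return '_OBFUSCATED_'
-- ===== SOURCE B (Python) =====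
-- def process_obfuscated_pkg(loc):
--     if loc == 'appcode' or loc == 'appcode/':
--         return 'appcode'
--
--     if loc == '.':
--         return '_OBFUSCATED_'
--
--     split = loc.split('.')
--
--     # accumulate the kept prefix directly: buffer segments, and flush the
--     # buffer into kept whenever a segment longer than one character arrives;
--     # whatever is still buffered at the end is the trailing run of short
--     # segments and is dropped.
--     kept, pending = [], []
--     for s in split:
--         pending.append(s)
--         if len(s) > 1:
--             kept += pending
--             pending = []
--
--     if len(kept) > 1 or len(kept) == len(split):
--         return '.'.join(kept)
--     else:
--         return '_OBFUSCATED_'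
-- ===== Notes on version B (the rewrite author's own statement) =====
-- stated objective: alternative
-- what changed: A scans the segments backwards with reversed()/break to compute a cut index and then slices and joins; B never computes an index: a single forward pass maintains two lists, buffering segments and flushing the buffer into the kept prefix whenever a segment longer than one character arrives, so the trailing short run is simply the unflushed buffer, and the join runs over the kept list itself.
import Mathlib
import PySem

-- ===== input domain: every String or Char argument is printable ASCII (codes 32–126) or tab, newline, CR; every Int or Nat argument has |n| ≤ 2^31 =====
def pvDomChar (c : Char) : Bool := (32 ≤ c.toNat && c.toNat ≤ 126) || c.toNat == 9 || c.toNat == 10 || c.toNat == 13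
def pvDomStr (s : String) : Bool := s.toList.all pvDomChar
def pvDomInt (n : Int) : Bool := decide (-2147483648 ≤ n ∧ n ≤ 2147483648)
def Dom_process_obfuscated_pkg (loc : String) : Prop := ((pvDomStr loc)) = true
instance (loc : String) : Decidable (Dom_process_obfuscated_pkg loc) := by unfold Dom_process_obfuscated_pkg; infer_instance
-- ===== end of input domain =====

-- B replaces A's backward reversed()+break index computation by a forward buffer-flush
-- pass that builds the kept segment list directly and joins it (objective: alternative).


-- ===== PORT A =====
-- A's loop: 'for s in reversed(split): if len(s) > 1: break else: cut -= 1'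
def pkgLoopA : List String → Int → Int
  | [], cut => cut
  | s :: rest, cut => if 1 < PySem.Str.len s then cut else pkgLoopA rest (cut - 1)

def process_obfuscated_pkg (loc : String) : String :=
  if loc = "appcode" ∨ loc = "appcode/" then "appcode"
  else if loc = "." then "_OBFUSCATED_"
  else
    let split := (PySem.Str.split? loc ".").getD []   -- sep "." ≠ "": split? is always some
    let cut := pkgLoopA split.reverse (split.length : Int)
    if 1 < cut ∨ cut = (split.length : Int) then
      PySem.Str.join "." (PySem.List.slice split (some 0) (some cut))
    else "_OBFUSCATED_"

-- ===== PORT B =====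
-- B's loop: 'for s in split: pending.append(s); if len(s) > 1: kept += pending; pending = []'
def process_obfuscated_pkg_alt (loc : String) : String :=
  if loc = "appcode" ∨ loc = "appcode/" then "appcode"
  else if loc = "." then "_OBFUSCATED_"
  else
    let split := (PySem.Str.split? loc ".").getD []
    let kp := split.foldl
      (fun (kp : List String × List String) s =>
        let pending := kp.2 ++ [s]
        if 1 < PySem.Str.len s then (kp.1 ++ pending, []) else (kp.1, pending))
      ([], [])
    let kept := kp.1
    if 1 < kept.length ∨ kept.length = split.length then
      PySem.Str.join "." kept
    else "_OBFUSCATED_"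

-- ===== PRECONDITION & SPEC =====
def Spec_process_obfuscated_pkg (loc : String) (out : String) : Prop := out = process_obfuscated_pkg_alt loc
instance (loc : String) (out : String) : Decidable (Spec_process_obfuscated_pkg loc out) := by unfold Spec_process_obfuscated_pkg; infer_instance

-- ===== CLAIM (what is proved, stated in full; the proofs are below) =====
def Claim_equal_process_obfuscated_pkg : Prop := ∀ (loc : String), Dom_process_obfuscated_pkg loc → Spec_process_obfuscated_pkg loc (process_obfuscated_pkg loc)

-- ===== LEMMAS AND PROOFS =====

-- A's cut, as a function of the segment list.
def cutA (l : List String) : Int := pkgLoopA l.reverse (l.length : Int)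

theorem cutA_nil : cutA [] = 0 := rfl

-- right-append recurrence of A's backward loop
theorem cutA_append (l : List String) (s : String) :
    cutA (l ++ [s]) = if 1 < PySem.Str.len s then (l.length : Int) + 1 else cutA l := by
  unfold cutA
  have h1 : (l ++ [s]).reverse = s :: l.reverse := by simp
  have h2 : (((l ++ [s]).length : Nat) : Int) = (l.length : Int) + 1 := by simp
  rw [h1, h2]
  simp only [pkgLoopA]
  split_ifs with h
  · rfl
  · congr 1; ring

theorem cutA_bounds (l : List String) : 0 ≤ cutA l ∧ cutA l ≤ (l.length : Int) := by
  induction l using List.reverseRecOn with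
  | nil => simp [cutA_nil]
  | append_singleton l s ih =>
    rw [cutA_append]
    split_ifs <;> simp <;> omega

def stepB (kp : List String × List String) (s : String) : List String × List String :=
  let pending := kp.2 ++ [s]
  if 1 < PySem.Str.len s then (kp.1 ++ pending, []) else (kp.1, pending)

-- invariant of B's buffer-flush pass: kept is the prefix of l up to A's cut
-- (unchanged when the cut is 0), pending is the rest of l (all of p ++ l when the cut is 0)
theorem foldB_eq (l : List String) : ∀ (k p : List String),
    l.foldl stepB (k, p) =
      (if cutA l = 0 then k else k ++ p ++ l.take (cutA l).toNat,
       if cutA l = 0 then p ++ l else l.drop (cutA l).toNat) := by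
  induction l using List.reverseRecOn with
  | nil => intro k p; simp [cutA_nil]
  | append_singleton l s ih =>
    intro k p
    have hb := cutA_bounds l
    rw [List.foldl_append, ih k p, cutA_append]
    simp only [List.foldl_cons, List.foldl_nil, stepB]
    by_cases hs : 1 < PySem.Str.len s
    · have hne : ¬((l.length : Int) + 1 = 0) := by omega
      have ht : ((l.length : Int) + 1).toNat = l.length + 1 := by omega
      simp only [if_pos hs, if_neg hne, ht]
      have htk : (l ++ [s]).take (l.length + 1) = l ++ [s] :=
        List.take_of_length_le (by simp)
      have htd : (l ++ [s]).drop (l.length + 1) = [] :=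
        List.drop_of_length_le (by simp)
      by_cases h0 : cutA l = 0
      · simp only [if_pos h0, htk, htd]
        simp [List.append_assoc]
      · simp only [if_neg h0, htk, htd]
        have hsplit : l.take (cutA l).toNat ++ l.drop (cutA l).toNat = l :=
          List.take_append_drop _ _
        rw [Prod.mk.injEq]
        refine ⟨?_, rfl⟩
        simp only [List.append_assoc]
        rw [← List.append_assoc (l.take (cutA l).toNat), hsplit]
    · simp only [if_neg hs]
      by_cases h0 : cutA l = 0
      · simp only [if_pos h0]
        simp [List.append_assoc]
      · have hc : (cutA l).toNat ≤ l.length := by omega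
        simp only [if_neg h0]
        rw [Prod.mk.injEq]
        exact ⟨by rw [List.take_append_of_le_length hc],
               by rw [List.drop_append_of_le_length hc]⟩

-- B's kept list is the take at A's cut, from the empty initial state.
theorem keptB_eq (l : List String) :
    (l.foldl stepB ([], [])).1 = l.take (cutA l).toNat := by
  rw [foldB_eq l [] []]
  by_cases h0 : cutA l = 0
  · simp [h0]
  · simp [h0]

theorem process_obfuscated_pkg_eq (loc : String) :
    process_obfuscated_pkg loc = process_obfuscated_pkg_alt loc := by
  unfold process_obfuscated_pkg process_obfuscated_pkg_alt
  dsimp only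
  by_cases h1 : loc = "appcode" ∨ loc = "appcode/"
  · rw [if_pos h1, if_pos h1]
  rw [if_neg h1, if_neg h1]
  by_cases h2 : loc = "."
  · rw [if_pos h2, if_pos h2]
  rw [if_neg h2, if_neg h2]
  set l := (PySem.Str.split? loc ".").getD [] with hl
  have hfold : (l.foldl
      (fun (kp : List String × List String) s =>
        if 1 < PySem.Str.len s then (kp.1 ++ (kp.2 ++ [s]), []) else (kp.1, kp.2 ++ [s]))
      ([], [])) = l.foldl stepB ([], []) := rfl
  have hA : pkgLoopA l.reverse ((l.length : Nat) : Int) = cutA l := rfl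
  have hb := cutA_bounds l
  have hkept := keptB_eq l
  have hlen : (l.take (cutA l).toNat).length = (cutA l).toNat := by
    rw [List.length_take]; omega
  have hslice : PySem.List.slice l (some 0) (some (cutA l)) = l.take (cutA l).toNat := by
    rw [PySem.List.slice_zero_start, PySem.List.slice_to _ hb.1]
  rw [hfold, hkept, hA, hslice, hlen]
  by_cases hc : 1 < cutA l ∨ cutA l = (l.length : Int)
  · rw [if_pos hc, if_pos (by omega : 1 < (cutA l).toNat ∨ (cutA l).toNat = l.length)]
  · rw [if_neg hc, if_neg (by omega : ¬(1 < (cutA l).toNat ∨ (cutA l).toNat = l.length))]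

-- ===== VERDICT (by name: the statement is the Claim_ definition above) =====
theorem process_obfuscated_pkg_spec : Claim_equal_process_obfuscated_pkg := by
  intro loc _
  exact process_obfuscated_pkg_eq loc
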